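-- pv_equiv track=rewrite | github.com/imrushi/AI-Fintess-Coach | backend/ingestion/normaliser.py | _extract_body_battery
-- ===== SOURCE A (Python) =====
-- def _extract_body_battery(raw) -> dict:
--     if not raw or not isinstance(raw, list):
--         return {}
--     values: list[int] = []
--     for entry in raw:
--         arr = entry.get("bodyBatteryValuesArray") if isinstance(entry, dict) else None
--         if not arr:
--             continue
--         for pair in arr:
--             if isinstance(pair, (list, tuple)) and len(pair) >= 2 and pair[1] is not None:
--                 values.append(int(pair[1]))
--     if not values:
--         return {}
--     return {
--         "body_battery_min": min(values),
--         "body_battery_max": max(values),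
--     }
-- ===== SOURCE B (Python) =====
-- def _extract_body_battery(raw) -> dict:
--     if not raw or not isinstance(raw, list):
--         return {}
--     ordered = sorted(
--         int(pair[1])
--         for entry in raw
--         if isinstance(entry, dict)
--         for pair in (entry.get("bodyBatteryValuesArray") or [])
--         if isinstance(pair, (list, tuple)) and len(pair) >= 2 and pair[1] is not None
--     )
--     if not ordered:
--         return {}
--     return {"body_battery_min": ordered[0], "body_battery_max": ordered[-1]}
-- ===== Notes on version B (the rewrite author's own statement) =====
-- stated objective: alternative
-- what changed: B replaces A's nested guarded loops that append into a list followed by separate min() and max() calls with a single flattening generator expression fed to sorted(), returning the first and last element of the sorted list as min and max.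
import Mathlib
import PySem

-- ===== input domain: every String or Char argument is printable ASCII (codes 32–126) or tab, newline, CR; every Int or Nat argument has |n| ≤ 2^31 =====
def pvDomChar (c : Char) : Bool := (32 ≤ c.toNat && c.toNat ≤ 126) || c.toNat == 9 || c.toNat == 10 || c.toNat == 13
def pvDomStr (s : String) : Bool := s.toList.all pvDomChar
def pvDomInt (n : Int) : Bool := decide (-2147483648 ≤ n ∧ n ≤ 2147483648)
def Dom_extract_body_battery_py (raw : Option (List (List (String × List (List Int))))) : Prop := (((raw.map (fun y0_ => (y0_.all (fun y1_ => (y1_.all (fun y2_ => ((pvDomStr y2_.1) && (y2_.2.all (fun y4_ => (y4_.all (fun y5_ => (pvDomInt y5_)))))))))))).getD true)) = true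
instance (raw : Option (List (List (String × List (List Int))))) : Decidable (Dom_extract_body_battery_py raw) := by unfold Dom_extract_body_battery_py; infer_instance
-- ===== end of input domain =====

-- B flattens the valid values with one comprehension, sorts once, and returns first/last of the sorted list instead of A's append-loop + min()/max().

-- ===== PORT A =====
-- inner 'for pair in arr' appending int(pair[1]) (pair[1] is an Int here, never None)
def pvA_pairs (acc : List Int) (arr : List (List Int)) : List Int :=
  arr.foldl (fun a pair => if 2 ≤ pair.length then a ++ [PySem.List.pyGetD pair 1 0] else a) acc

def extract_body_battery_py (raw : Option (List (List (String × List (List Int))))) : List (String × Int) :=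
  match raw with
  | none => []
  | some l =>
    if l = [] then [] else
    let values : List Int :=
      l.foldl (fun acc entry =>
        match (PySem.Dict.mk entry).get? "bodyBatteryValuesArray" with
        | none => acc
        | some arr => if arr = [] then acc else pvA_pairs acc arr) []
    if values = [] then []
    else [("body_battery_min", (PySem.List.min? values (fun y => y)).getD 0),
          ("body_battery_max", (PySem.List.max? values (fun y => y)).getD 0)]

-- ===== PORT B =====
-- the generator expression: values contributed by one entry
def pvB_vals (entry : List (String × List (List Int))) : List Int :=
  match (PySem.Dict.mk entry).get? "bodyBatteryValuesArray" with
  | none => []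
  | some arr => arr.filterMap (fun pair => if 2 ≤ pair.length then some (PySem.List.pyGetD pair 1 0) else none)

def extract_body_battery_py_alt (raw : Option (List (List (String × List (List Int))))) : List (String × Int) :=
  match raw with
  | none => []
  | some l =>
    if l = [] then [] else
    let ordered := PySem.List.sorted (l.flatMap pvB_vals) (fun x => x) false
    if ordered = [] then []
    else [("body_battery_min", PySem.List.pyGetD ordered 0 0),
          ("body_battery_max", PySem.List.pyGetD ordered (-1) 0)]

-- ===== PRECONDITION & SPEC =====
def Spec_extract_body_battery_py (raw : Option (List (List (String × List (List Int))))) (out : List (String × Int)) : Prop := out = extract_body_battery_py_alt raw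
instance (raw : Option (List (List (String × List (List Int))))) (out : List (String × Int)) : Decidable (Spec_extract_body_battery_py raw out) := by unfold Spec_extract_body_battery_py; infer_instance

-- ===== CLAIM (what is proved, stated in full; the proofs are below) =====
def Claim_equal_extract_body_battery_py : Prop := ∀ (raw : Option (List (List (String × List (List Int))))), Dom_extract_body_battery_py raw → Spec_extract_body_battery_py raw (extract_body_battery_py raw)

-- ===== LEMMAS AND PROOFS =====

-- A's inner append loop over one arr = acc ++ the filterMap B comprehends for that arr
theorem pvA_pairs_eq (arr : List (List Int)) (acc : List Int) :
    pvA_pairs acc arr = acc ++ arr.filterMap (fun pair => if 2 ≤ pair.length then some (PySem.List.pyGetD pair 1 0) else none) := by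
  induction arr generalizing acc with
  | nil => simp [pvA_pairs]
  | cons pair rest ih =>
    simp only [pvA_pairs, List.foldl_cons, List.filterMap_cons] at *
    by_cases h : 2 ≤ pair.length
    · simp only [h, if_pos]
      rw [ih]; simp
    · simp only [h, if_false]
      exact ih acc

-- A's outer loop collects exactly B's flatMap
theorem pvA_values_eq (l : List (List (String × List (List Int)))) (acc : List Int) :
    l.foldl (fun acc entry =>
        match (PySem.Dict.mk entry).get? "bodyBatteryValuesArray" with
        | none => acc
        | some arr => if arr = [] then acc else pvA_pairs acc arr) acc
    = acc ++ l.flatMap pvB_vals := by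
  induction l generalizing acc with
  | nil => simp
  | cons entry rest ih =>
    simp only [List.foldl_cons, List.flatMap_cons]
    cases hget : (PySem.Dict.mk entry).get? "bodyBatteryValuesArray" with
    | none => rw [ih]; simp [pvB_vals, hget]
    | some arr =>
      by_cases ha : arr = []
      · simp only [ha, if_pos]
        rw [ih]; simp [pvB_vals, hget, ha]
      · simp only [ha, if_false]
        rw [pvA_pairs_eq, ih, pvB_vals, hget, List.append_assoc]

-- in a ≤-pairwise list, every element is ≤ the last
theorem pv_le_getLast (xs : List Int) (hp : xs.Pairwise (· ≤ ·)) (h : xs ≠ []) :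
    ∀ y ∈ xs, y ≤ xs.getLast h := by
  induction xs with
  | nil => exact absurd rfl h
  | cons x t ih =>
    intro y hy
    cases t with
    | nil => simp at hy; simp [hy]
    | cons b tb =>
      rw [List.getLast_cons (by simp)]
      have hpt := List.pairwise_cons.mp hp
      rcases List.mem_cons.mp hy with rfl | hyt
      · exact hpt.1 _ (List.getLast_mem (by simp))
      · exact ih hpt.2 (by simp) y hyt

-- min(values) is the head and max(values) the last of sorted(values)
theorem pv_min_eq_head (values : List Int) (h : values ≠ []) :
    (PySem.List.min? values (fun y => y)).getD 0
      = PySem.List.pyGetD (PySem.List.sorted values (fun x => x) false) 0 0 := by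
  have hs : PySem.List.sorted values (fun x => x) false ≠ [] := by
    simp [PySem.List.sorted_eq_nil_iff, h]
  obtain ⟨m, t, hmt⟩ := List.exists_cons_of_ne_nil hs
  cases hmin : PySem.List.min? values (fun y => y) with
  | none => exact absurd ((PySem.List.min?_eq_none_iff _ _).mp hmin) h
  | some mn =>
    have hmn_mem : mn ∈ values := PySem.List.min?_mem hmin
    have hm_mem : m ∈ values := by
      have hms : m ∈ PySem.List.sorted values (fun x => x) false := by rw [hmt]; simp
      exact (PySem.List.mem_sorted _ _ _ _).mp hms
    have h1 : mn ≤ m := PySem.List.min?_isMin hmin m hm_mem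
    have h2 : m ≤ mn := PySem.List.key_head_sorted_le values (fun x => x) hmt mn hmn_mem
    rw [hmt, PySem.List.pyGetD_zero_cons]
    simp [le_antisymm h1 h2]

theorem pv_max_eq_last (values : List Int) (h : values ≠ []) :
    (PySem.List.max? values (fun y => y)).getD 0
      = PySem.List.pyGetD (PySem.List.sorted values (fun x => x) false) (-1) 0 := by
  have hs : PySem.List.sorted values (fun x => x) false ≠ [] := by
    simp [PySem.List.sorted_eq_nil_iff, h]
  rw [PySem.List.pyGetD_neg_one _ _ hs]
  have hlast_mem : (PySem.List.sorted values (fun x => x) false).getLast hs ∈ values :=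
    (PySem.List.mem_sorted _ _ _ _).mp (List.getLast_mem hs)
  cases hmax : PySem.List.max? values (fun y => y) with
  | none => exact absurd ((PySem.List.max?_eq_none_iff _ _).mp hmax) h
  | some mx =>
    have hmx_mem : mx ∈ values := PySem.List.max?_mem hmax
    have hmx_sorted : mx ∈ PySem.List.sorted values (fun x => x) false :=
      (PySem.List.mem_sorted _ _ _ _).mpr hmx_mem
    have hp : (PySem.List.sorted values (fun x => x) false).Pairwise (· ≤ ·) := by
      simpa using PySem.List.sorted_pairwise values (fun x => x)
    have h1 : mx ≤ (PySem.List.sorted values (fun x => x) false).getLast hs :=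
      pv_le_getLast _ hp hs mx hmx_sorted
    have h2 : (PySem.List.sorted values (fun x => x) false).getLast hs ≤ mx :=
      PySem.List.max?_isMax hmax _ hlast_mem
    simp [le_antisymm h1 h2]

-- ===== VERDICT (by name: the statement is the Claim_ definition above) =====
theorem extract_body_battery_py_spec : Claim_equal_extract_body_battery_py := by
  intro raw _
  unfold Spec_extract_body_battery_py extract_body_battery_py extract_body_battery_py_alt
  cases raw with
  | none => rfl
  | some l =>
    by_cases hl : l = []
    · simp [hl]
    · simp only [hl, reduceIte]
      rw [pvA_values_eq l []]
      simp only [List.nil_append]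
      by_cases hv : l.flatMap pvB_vals = []
      · simp [hv, PySem.List.sorted_eq_nil_iff]
      · have hs : PySem.List.sorted (l.flatMap pvB_vals) (fun x => x) false ≠ [] := by
          simp [PySem.List.sorted_eq_nil_iff, hv]
        simp only [hv, if_false, hs, if_false]
        rw [pv_min_eq_head _ hv, pv_max_eq_last _ hv]
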